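-- pv_equiv track=rewrite | github.com/pinotronic/LimpiandoTexto | Proceso.py | cambiandoBulletsdeCinco
-- ===== SOURCE A (Python) =====
-- def cambiandoBulletsdeCinco(CambiandolosPuntos):
--         CambiandolosPuntos = CambiandolosPuntos +"xxxxx"
--         Casilla5 = ""
--         Casilla4 = ""
--         Casilla3 = ""
--         Casilla2 = ""
--         Casilla1 = ""
--         TextoFinal =""
--
--         for letra in CambiandolosPuntos:
--
--             Final = Casilla5
--             Casilla5 = Casilla4
--             Casilla4 = Casilla3
--             Casilla3 = Casilla2
--             Casilla2 = Casilla1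
--             Casilla1 = letra
--
--             # \n . " " \n M
--             if Casilla5 == "\n" and Casilla4 == "." and Casilla3 == " " and Casilla2 == "\n"  and Casilla1.isupper() == True :
--                 Casilla4 = Casilla4.replace(".","•")
--                 TextoFinal = TextoFinal +Final
--                 # \n o " " \n M
--             elif Casilla5 == "\n" and Casilla4 == "o" and Casilla3 == " " and Casilla2 == "\n"   and Casilla1.isupper() == True :
--                 Casilla4 = Casilla4.replace("o","•")
--                 TextoFinal = TextoFinal +Final
--                 # \n - " " \n M
--             elif Casilla5 == "\n" and Casilla4 == "-" and Casilla3 == " " and Casilla2 == "\n"   and Casilla1.isupper() == True :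
--                 Casilla4 = Casilla4.replace("-","•")
--                 TextoFinal = TextoFinal +Final
--             elif Casilla5 == "\n" and Casilla4 == "*" and Casilla3 == " " and Casilla2 == "\n"   and Casilla1.isupper() == True :
--                 Casilla4 = Casilla4.replace("*","•")
--                 TextoFinal = TextoFinal +Final
--             elif Casilla5.islower() == True and Casilla4 == " " and Casilla3 == "\n " and Casilla2 == "\n"   and Casilla1.isupper() == True :
--                 Casilla4 = ".\n"
--                 TextoFinal = TextoFinal +Final
--             else:
--                 TextoFinal = TextoFinal +Final
--
--         return TextoFinal
-- ===== SOURCE B (Python) =====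
-- BULLETS = ".o-*"
--
-- def cambiandoBulletsdeCinco(CambiandolosPuntos):
--     s = CambiandolosPuntos
--     n = len(s)
--     out = []
--     i = 0
--     while i < n:
--         if (s[i] == '\n' and i + 4 < n and s[i+1] in BULLETS and s[i+2] == ' '
--                 and s[i+3] == '\n' and s[i+4].isupper()):
--             out.append('\n\u2022' + s[i+2:i+5])
--             i += 5
--         else:
--             out.append(s[i])
--             i += 1
--     return ''.join(out)
-- ===== Notes on version B (the rewrite author's own statement) =====
-- stated objective: simpler
-- what changed: Replaced A's five shift-register variables, the five-x padding and the delayed one-character emission by a direct lookahead scan over the characters that, when a newline, a bullet character, a space, a newline and an uppercase letter follow in sequence, emits those five characters with the bullet turned into • and advances five positions, otherwise copies one character.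
import Mathlib
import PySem

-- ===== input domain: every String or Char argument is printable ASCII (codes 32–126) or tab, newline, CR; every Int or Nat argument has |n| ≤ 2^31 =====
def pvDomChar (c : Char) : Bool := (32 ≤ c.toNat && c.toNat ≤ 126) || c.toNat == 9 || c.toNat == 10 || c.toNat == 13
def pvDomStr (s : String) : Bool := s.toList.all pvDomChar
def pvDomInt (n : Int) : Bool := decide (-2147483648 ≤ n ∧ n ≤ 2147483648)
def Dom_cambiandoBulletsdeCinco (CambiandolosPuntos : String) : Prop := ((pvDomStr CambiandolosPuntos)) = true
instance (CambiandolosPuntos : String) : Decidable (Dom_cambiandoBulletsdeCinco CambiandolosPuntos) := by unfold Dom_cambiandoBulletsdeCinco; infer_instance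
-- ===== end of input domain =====

-- B replaces A's five shift-register variables, the five-x padding and the delayed one-character
-- emission by a direct lookahead scan that, on a match, emits the whole five-character window at
-- once with the bullet turned into a real bullet (objective: simpler).

-- ===== PORT A =====

-- Python str.isupper()/str.islower(): at least one cased character and no cased character of the
-- opposite case.  Hand-ported (PySem has only the per-char tests); exact for the strings that occur
-- here: "", single ASCII characters and "•" (cased = exactly the ASCII letters among those).
def pyStrIsupper (s : String) : Bool :=
  s.toList.any PySem.Chars.isupper && s.toList.all (fun c => !(PySem.Chars.islower c))

def pyStrIslower (s : String) : Bool :=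
  s.toList.any PySem.Chars.islower && s.toList.all (fun c => !(PySem.Chars.isupper c))

structure PvAState where
  c5 : String
  c4 : String
  c3 : String
  c2 : String
  c1 : String
  tf : List Char   -- TextoFinal, kept as its character list (String.ofList at the end)

-- one iteration of A's `for letra in CambiandolosPuntos:` loop, branch for branch
def pvAStep (st : PvAState) (letra : Char) : PvAState :=
  let Final := st.c5
  let c5 := st.c4
  let c4 := st.c3
  let c3 := st.c2
  let c2 := st.c1
  let c1 := String.ofList [letra]
  if c5 = "\n" ∧ c4 = "." ∧ c3 = " " ∧ c2 = "\n" ∧ pyStrIsupper c1 = true then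
    ⟨c5, PySem.Str.replace c4 "." "•", c3, c2, c1, st.tf ++ Final.toList⟩
  else if c5 = "\n" ∧ c4 = "o" ∧ c3 = " " ∧ c2 = "\n" ∧ pyStrIsupper c1 = true then
    ⟨c5, PySem.Str.replace c4 "o" "•", c3, c2, c1, st.tf ++ Final.toList⟩
  else if c5 = "\n" ∧ c4 = "-" ∧ c3 = " " ∧ c2 = "\n" ∧ pyStrIsupper c1 = true then
    ⟨c5, PySem.Str.replace c4 "-" "•", c3, c2, c1, st.tf ++ Final.toList⟩
  else if c5 = "\n" ∧ c4 = "*" ∧ c3 = " " ∧ c2 = "\n" ∧ pyStrIsupper c1 = true then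
    ⟨c5, PySem.Str.replace c4 "*" "•", c3, c2, c1, st.tf ++ Final.toList⟩
  else if pyStrIslower c5 = true ∧ c4 = " " ∧ c3 = "\n " ∧ c2 = "\n" ∧ pyStrIsupper c1 = true then
    ⟨c5, ".\n", c3, c2, c1, st.tf ++ Final.toList⟩
  else
    ⟨c5, c4, c3, c2, c1, st.tf ++ Final.toList⟩

def cambiandoBulletsdeCinco (CambiandolosPuntos : String) : String :=
  let padded := CambiandolosPuntos ++ "xxxxx"
  String.ofList ((padded.toList.foldl pvAStep ⟨"", "", "", "", "", []⟩).tf)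

-- ===== PORT B =====

-- BULLETS = ".o-*";  `s[i+1] in BULLETS` for the single character s[i+1]
def pvIsBullet (c : Char) : Bool := ['.', 'o', '-', '*'].contains c

-- Source B's while loop over the character list: on a full "\n<bullet> \n<upper>" window emit the
-- window with the bullet replaced by '•' and advance 5, otherwise emit one character and advance 1.
def pvAltGo : List Char → List Char
  | '\n' :: b :: ' ' :: '\n' :: u :: rest =>
      if pvIsBullet b && pyStrIsupper (String.ofList [u]) then
        '\n' :: '•' :: ' ' :: '\n' :: u :: pvAltGo rest
      else '\n' :: pvAltGo (b :: ' ' :: '\n' :: u :: rest)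
  | c :: rest => c :: pvAltGo rest
  | [] => []

def cambiandoBulletsdeCinco_alt (CambiandolosPuntos : String) : String :=
  String.ofList (pvAltGo CambiandolosPuntos.toList)

-- ===== PRECONDITION & SPEC =====
def Spec_cambiandoBulletsdeCinco (CambiandolosPuntos : String) (out : String) : Prop := out = cambiandoBulletsdeCinco_alt CambiandolosPuntos
instance (CambiandolosPuntos : String) (out : String) : Decidable (Spec_cambiandoBulletsdeCinco CambiandolosPuntos out) := by unfold Spec_cambiandoBulletsdeCinco; infer_instance

-- ===== CLAIM (what is proved, stated in full; the proofs are below) =====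
def Claim_equal_cambiandoBulletsdeCinco : Prop := ∀ (CambiandolosPuntos : String), Dom_cambiandoBulletsdeCinco CambiandolosPuntos → Spec_cambiandoBulletsdeCinco CambiandolosPuntos (cambiandoBulletsdeCinco CambiandolosPuntos)

-- ===== LEMMAS AND PROOFS =====

-- A's loop, refactored for the proof: the registers (c5,c4,c3,c2,c1) as parameters, the emitted
-- characters as the result (the tf accumulator stripped off).
def pvE (r5 r4 r3 r2 r1 : String) : List Char → List Char
  | [] => []
  | letra :: l =>
    let c1 := String.ofList [letra]
    if r4 = "\n" ∧ r3 = "." ∧ r2 = " " ∧ r1 = "\n" ∧ pyStrIsupper c1 = true then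
      r5.toList ++ pvE r4 "•" r2 r1 c1 l
    else if r4 = "\n" ∧ r3 = "o" ∧ r2 = " " ∧ r1 = "\n" ∧ pyStrIsupper c1 = true then
      r5.toList ++ pvE r4 "•" r2 r1 c1 l
    else if r4 = "\n" ∧ r3 = "-" ∧ r2 = " " ∧ r1 = "\n" ∧ pyStrIsupper c1 = true then
      r5.toList ++ pvE r4 "•" r2 r1 c1 l
    else if r4 = "\n" ∧ r3 = "*" ∧ r2 = " " ∧ r1 = "\n" ∧ pyStrIsupper c1 = true then
      r5.toList ++ pvE r4 "•" r2 r1 c1 l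
    else if pyStrIslower r4 = true ∧ r3 = " " ∧ r2 = "\n " ∧ r1 = "\n" ∧ pyStrIsupper c1 = true then
      r5.toList ++ pvE r4 ".\n" r2 r1 c1 l
    else
      r5.toList ++ pvE r4 r3 r2 r1 c1 l

theorem pvFoldl_tf (l : List Char) : ∀ (st : PvAState),
    (l.foldl pvAStep st).tf = st.tf ++ pvE st.c5 st.c4 st.c3 st.c2 st.c1 l := by
  induction l with
  | nil => intro st; simp [pvE]
  | cons a l ih =>
    rintro ⟨a5, a4, a3, a2, a1, tf⟩
    rw [List.foldl_cons, ih]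
    simp only [pvAStep, pvE]
    split_ifs with h1 h2 h3 h4 h5 <;>
      simp_all [show PySem.Str.replace "." "." "•" = "•" from by decide,
        show PySem.Str.replace "o" "o" "•" = "•" from by decide,
        show PySem.Str.replace "-" "-" "•" = "•" from by decide,
        show PySem.Str.replace "*" "*" "•" = "•" from by decide]

-- the match predicates on the yet unread input (suffixes of the lookahead window)
def pvM1 : List Char → Bool
  | u :: _ => pyStrIsupper (String.ofList [u])
  | [] => false
def pvM2 : List Char → Bool
  | c :: t => c == '\n' && pvM1 t
  | [] => false
def pvM3 : List Char → Bool
  | c :: t => c == ' ' && pvM2 t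
  | [] => false
def pvM4 : List Char → Bool
  | b :: t => pvIsBullet b && pvM3 t
  | [] => false

def pvBulS (r : String) : Prop := r = "." ∨ r = "o" ∨ r = "-" ∨ r = "*"

theorem pvE_pad (r5 r4 r3 r2 r1 : String) :
    pvE r5 r4 r3 r2 r1 ['x', 'x', 'x', 'x', 'x'] =
      r5.toList ++ r4.toList ++ r3.toList ++ r2.toList ++ r1.toList := by
  simp [pvE, show pyStrIsupper (String.ofList ['x']) = false from by decide]

theorem pvE_step_notupper (r5 r4 r3 r2 r1 : String) (c : Char) (l : List Char)
    (h : pyStrIsupper (String.ofList [c]) = false) :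
    pvE r5 r4 r3 r2 r1 (c :: l) = r5.toList ++ pvE r4 r3 r2 r1 (String.ofList [c]) l := by
  simp [pvE, h]

theorem pvE_step_else (r5 r4 r3 r2 r1 : String) (c : Char) (l : List Char)
    (h4 : ¬(r4 = "\n" ∧ pvBulS r3 ∧ r2 = " " ∧ r1 = "\n" ∧ pyStrIsupper (String.ofList [c]) = true))
    (h2len : r2.toList.length ≤ 1) :
    pvE r5 r4 r3 r2 r1 (c :: l) = r5.toList ++ pvE r4 r3 r2 r1 (String.ofList [c]) l := by
  simp only [pvE]
  split_ifs with hA hB hC hD hE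
  · exact absurd ⟨hA.1, Or.inl hA.2.1, hA.2.2.1, hA.2.2.2⟩ h4
  · exact absurd ⟨hB.1, Or.inr (Or.inl hB.2.1), hB.2.2.1, hB.2.2.2⟩ h4
  · exact absurd ⟨hC.1, Or.inr (Or.inr (Or.inl hC.2.1)), hC.2.2.1, hC.2.2.2⟩ h4
  · exact absurd ⟨hD.1, Or.inr (Or.inr (Or.inr hD.2.1)), hD.2.2.1, hD.2.2.2⟩ h4
  · rw [hE.2.2.1] at h2len; exact absurd h2len (by decide)
  · rfl

theorem pvE_step_fire (r5 : String) (b u : Char) (l : List Char)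
    (hb : pvIsBullet b = true) (hu : pyStrIsupper (String.ofList [u]) = true) :
    pvE r5 "\n" (String.ofList [b]) " " "\n" (u :: l) =
      r5.toList ++ pvE "\n" "•" " " "\n" (String.ofList [u]) l := by
  have hb' : b = '.' ∨ b = 'o' ∨ b = '-' ∨ b = '*' := by
    simpa [pvIsBullet] using hb
  rcases hb' with h | h | h | h <;> subst h <;> simp [pvE, hu]

-- small literal facts and helpers used by the main induction
theorem pvNl : String.ofList ['\n'] = "\n" := by decide
theorem pvSp : String.ofList [' '] = " " := by decide

theorem pvOfList_singleton_eq {c d : Char} (h : String.ofList [c] = String.ofList [d]) : c = d := by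
  have := congrArg String.toList h; simpa using this

theorem pvBulS_char (c : Char) (h : pvBulS (String.ofList [c])) : pvIsBullet c = true := by
  rcases h with h | h | h | h <;>
    · have := congrArg String.toList h
      simp at this
      subst this
      decide

theorem pvM4_false_of_noshape (rest : List Char)
    (h : ∀ (b u : Char) (r : List Char), rest = b :: ' ' :: '\n' :: u :: r → False) :
    pvM4 rest = false := by
  rcases rest with _ | ⟨b, rest1⟩
  · rfl
  rcases rest1 with _ | ⟨x, rest2⟩
  · simp [pvM4, pvM3]
  by_cases hx : x = ' '
  · subst hx
    rcases rest2 with _ | ⟨y, rest3⟩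
    · simp [pvM4, pvM3, pvM2]
    by_cases hy : y = '\n'
    · subst hy
      rcases rest3 with _ | ⟨u, r⟩
      · simp [pvM4, pvM3, pvM2, pvM1]
      · exact (h b u r rfl).elim
    · simp [pvM4, pvM3, pvM2, hy]
  · simp [pvM4, pvM3, hx]

theorem pvAltGo_cons (c : Char) (rest : List Char)
    (h : ∀ (b u : Char) (r : List Char), c = '\n' → rest = b :: ' ' :: '\n' :: u :: r → False) :
    pvAltGo (c :: rest) = c :: pvAltGo rest := by
  rw [pvAltGo.eq_def]
  split
  · rename_i b u r heq
    injection heq with h1 h2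
    exact (h b u r h1 h2).elim
  · rename_i c' r' heq
    injection heq with h1 h2
    subst h1; subst h2; rfl
  · rename_i heq; exact absurd heq (by simp)

theorem pvK (t : List Char) : ∀ (r5 r4 r3 r2 r1 : String),
    r2.toList.length ≤ 1 → r1.toList.length ≤ 1 →
    (r1 = "\n" → pvM4 t = false) →
    ¬(r2 = "\n" ∧ pvBulS r1 ∧ pvM3 t = true) →
    ¬(r3 = "\n" ∧ pvBulS r2 ∧ r1 = " " ∧ pvM2 t = true) →
    ¬(r4 = "\n" ∧ pvBulS r3 ∧ r2 = " " ∧ r1 = "\n" ∧ pvM1 t = true) →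
    pvE r5 r4 r3 r2 r1 (t ++ ['x', 'x', 'x', 'x', 'x']) =
      r5.toList ++ r4.toList ++ r3.toList ++ r2.toList ++ r1.toList ++ pvAltGo t := by
  induction t using pvAltGo.induct with
  | case1 b u rest hcond ih =>
    intro r5 r4 r3 r2 r1 hl2 hl1 h1 h2 h3 h4
    rw [Bool.and_eq_true] at hcond
    obtain ⟨hb, hu⟩ := hcond
    have hbup : pyStrIsupper (String.ofList [b]) = false := by
      have hb' : b = '.' ∨ b = 'o' ∨ b = '-' ∨ b = '*' := by simpa [pvIsBullet] using hb
      rcases hb' with h | h | h | h <;> subst h <;> decide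
    rw [List.cons_append, List.cons_append, List.cons_append, List.cons_append, List.cons_append]
    rw [pvE_step_notupper _ _ _ _ _ _ _ (by decide)]
    rw [pvE_step_notupper _ _ _ _ _ _ _ hbup]
    rw [pvE_step_notupper _ _ _ _ _ _ _ (by decide)]
    rw [pvE_step_notupper _ _ _ _ _ _ _ (by decide)]
    simp only [pvNl, pvSp]
    rw [pvE_step_fire _ _ _ _ hb hu]
    rw [ih "\n" "•" " " "\n" (String.ofList [u]) (by decide) (by simp)
      (fun h => by
        have := pvOfList_singleton_eq (h.trans pvNl.symm)
        subst this
        exact absurd hu (by decide))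
      (fun ⟨_, hbul, _⟩ => by
        have := pvBulS_char u hbul
        have hu' : u = '.' ∨ u = 'o' ∨ u = '-' ∨ u = '*' := by simpa [pvIsBullet] using this
        rcases hu' with h | h | h | h <;> subst h <;> exact absurd hu (by decide))
      (fun ⟨h, _⟩ => absurd h (by decide))
      (fun ⟨h, _⟩ => absurd h (by decide))]
    rw [show pvAltGo ('\n' :: b :: ' ' :: '\n' :: u :: rest) =
        '\n' :: '•' :: ' ' :: '\n' :: u :: pvAltGo rest from by
      rw [pvAltGo.eq_def]; simp [hb, hu]]
    simp
  | case2 b u rest hcond ih =>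
    intro r5 r4 r3 r2 r1 hl2 hl1 h1 h2 h3 h4
    rw [List.cons_append]
    rw [pvE_step_notupper _ _ _ _ _ _ _ (by decide)]
    simp only [pvNl]
    rw [Bool.not_eq_true, Bool.and_eq_false_iff] at hcond
    rw [ih r4 r3 r2 r1 "\n" hl1 (by decide)
      (fun _ => by
        simp only [pvM4, pvM3, pvM2, pvM1]
        rcases hcond with h | h <;> simp [h])
      (fun ⟨_, hbul, _⟩ => by
        rcases hbul with h | h | h | h <;> exact absurd h (by decide))
      (fun ⟨_, _, h, _⟩ => absurd h (by decide))
      (fun ⟨ha, hbb, hc, _, hm⟩ => h3 ⟨ha, hbb, hc, by simpa [pvM2] using hm⟩)]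
    rw [show pvAltGo ('\n' :: b :: ' ' :: '\n' :: u :: rest) =
        '\n' :: pvAltGo (b :: ' ' :: '\n' :: u :: rest) from by
      rw [pvAltGo.eq_def]
      have : (pvIsBullet b && pyStrIsupper (String.ofList [u])) = false := by
        rcases hcond with h | h <;> simp [h]
      simp [this]]
    simp
  | case3 c rest hshape ih =>
    intro r5 r4 r3 r2 r1 hl2 hl1 h1 h2 h3 h4
    rw [List.cons_append]
    rw [pvE_step_else _ _ _ _ _ _ _
      (fun ⟨a, b, cc, d, e⟩ => h4 ⟨a, b, cc, d, by simpa [pvM1] using e⟩) hl2]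
    rw [ih r4 r3 r2 r1 (String.ofList [c]) hl1 (by simp)
      (fun h => by
        have hc : c = '\n' := pvOfList_singleton_eq (h.trans pvNl.symm)
        exact pvM4_false_of_noshape rest (fun b u r hr => hshape b u r hc hr))
      (fun ⟨hr1, hbul, hm3⟩ => by
        have hA := h1 hr1
        have hB := pvBulS_char c hbul
        rw [show pvM4 (c :: rest) = (pvIsBullet c && pvM3 rest) from rfl, hB, hm3] at hA
        exact absurd hA (by decide))
      (fun ⟨hr2, hbul1, hsp, hm2⟩ => by
        have hc : c = ' ' := pvOfList_singleton_eq (hsp.trans pvSp.symm)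
        subst hc
        exact h2 ⟨hr2, hbul1, by simpa [pvM3] using hm2⟩)
      (fun ⟨hr3, hbul2, hr1sp, hnl, hm1⟩ => by
        have hc : c = '\n' := pvOfList_singleton_eq (hnl.trans pvNl.symm)
        subst hc
        exact h3 ⟨hr3, hbul2, hr1sp, by simpa [pvM2] using hm1⟩)]
    rw [pvAltGo_cons c rest hshape]
    simp
  | case4 =>
    intro r5 r4 r3 r2 r1 _ _ _ _ _ _
    rw [List.nil_append, pvE_pad]
    simp [pvAltGo]

-- ===== VERDICT (by name: the statement is the Claim_ definition above) =====
theorem cambiandoBulletsdeCinco_spec : Claim_equal_cambiandoBulletsdeCinco := by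
  intro s _
  unfold Spec_cambiandoBulletsdeCinco cambiandoBulletsdeCinco cambiandoBulletsdeCinco_alt
  show String.ofList ((List.foldl pvAStep ⟨"", "", "", "", "", []⟩ (s ++ "xxxxx").toList).tf) =
    String.ofList (pvAltGo s.toList)
  have hpad : (s ++ "xxxxx").toList = s.toList ++ ['x', 'x', 'x', 'x', 'x'] := by simp
  rw [hpad, pvFoldl_tf]
  rw [show (PvAState.mk "" "" "" "" "" []).tf = [] from rfl]
  rw [pvK s.toList "" "" "" "" "" (by decide) (by decide)
    (fun h => absurd h (by decide))
    (fun ⟨h, _⟩ => absurd h (by decide))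
    (fun ⟨h, _⟩ => absurd h (by decide))
    (fun ⟨h, _⟩ => absurd h (by decide))]
  simp
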